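-- pv_equiv track=rewrite | github.com/flexxui/flexx | flexx/util/minify.py | tabbify
-- ===== SOURCE A (Python) =====
-- def tabbify(code):
--     lines = []
--     for line in code.splitlines():
--         line2 = line.lstrip(' \t')
--         indent_str = line[:len(line)-len(line2)]
--         for s1, s2 in [('    ', '\t'), ('  ', '\t'), (' ', '')]:
--             indent_str = indent_str.replace(s1, s2)
--         lines.append(indent_str + line2)
--     return '\n'.join(lines)
-- ===== SOURCE B (Python) =====
-- def tabbify(code):
--     out = []
--     for line in code.splitlines():
--         stripped = line.lstrip(' \t')
--         indent = line[:len(line)-len(stripped)]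
--         parts = []
--         run = 0
--         for c in indent:
--             if c == ' ':
--                 run += 1
--             else:  # c is a tab: flush the pending space run, keep the tab
--                 parts.append('\t' * (run // 4 + run % 4 // 2))
--                 parts.append(c)
--                 run = 0
--         parts.append('\t' * (run // 4 + run % 4 // 2))
--         out.append(''.join(parts) + stripped)
--     return '\n'.join(out)
-- ===== Notes on version B (the rewrite author's own statement) =====
-- stated objective: alternative
-- what changed: The three chained string-replacement passes over each line's indentation (four spaces to a tab, then two spaces to a tab, then lone spaces dropped) are replaced by a single left-to-right scan that run-length-counts each maximal space run and emits N//4 + N%4//2 tabs per run, copying existing tabs verbatim.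
import Mathlib
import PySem

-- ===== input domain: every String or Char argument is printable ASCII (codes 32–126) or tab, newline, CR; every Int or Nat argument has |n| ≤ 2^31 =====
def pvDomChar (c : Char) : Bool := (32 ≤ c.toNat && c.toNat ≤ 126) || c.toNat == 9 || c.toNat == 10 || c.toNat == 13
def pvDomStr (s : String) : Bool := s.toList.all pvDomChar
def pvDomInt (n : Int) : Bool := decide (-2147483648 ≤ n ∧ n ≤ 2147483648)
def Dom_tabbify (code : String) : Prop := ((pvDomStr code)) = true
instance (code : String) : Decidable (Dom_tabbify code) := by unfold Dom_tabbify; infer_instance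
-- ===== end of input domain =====

-- B replaces A's chain of three .replace passes over each line's indentation with a single
-- left-to-right scan converting each maximal run of N spaces into N/4 + N%4/2 tabs (objective: alternative).

-- ===== PORT A =====
-- per-line body of A's loop
def tabbifyLine (line : List Char) : List Char :=
  -- line.lstrip(' \t'): ported by hand as dropWhile over the two stripped characters (exact)
  let line2 := line.dropWhile (fun c => c == ' ' || c == '\t')
  let indent0 := PySem.Chars.slice line none (some ((line.length - line2.length : Nat) : Int))
  let indent1 := PySem.Chars.replace indent0 [' ', ' ', ' ', ' '] ['\t']
  let indent2 := PySem.Chars.replace indent1 [' ', ' '] ['\t']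
  let indent3 := PySem.Chars.replace indent2 [' '] []
  indent3 ++ line2

def tabbify (code : String) : String :=
  String.ofList (PySem.Chars.join ['\n']
    ((PySem.Chars.splitlines code.toList).foldl (fun acc line => acc ++ [tabbifyLine line]) []))

-- ===== PORT B =====
-- the inner for-loop of B: state = (characters emitted so far, length of the pending space run)
def convGo (cs : List Char) (parts : List Char) (run : Nat) : List Char :=
  match cs with
  | [] => parts ++ List.replicate (run / 4 + run % 4 / 2) '\t'
  | c :: rest =>
    if c == ' ' then convGo rest parts (run + 1)
    else convGo rest (parts ++ List.replicate (run / 4 + run % 4 / 2) '\t' ++ [c]) 0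

-- per-line body of B's loop
def tabbifyLineAlt (line : List Char) : List Char :=
  let stripped := line.dropWhile (fun c => c == ' ' || c == '\t')
  let indent := PySem.Chars.slice line none (some ((line.length - stripped.length : Nat) : Int))
  convGo indent [] 0 ++ stripped

def tabbify_alt (code : String) : String :=
  String.ofList (PySem.Chars.join ['\n']
    ((PySem.Chars.splitlines code.toList).foldl (fun acc line => acc ++ [tabbifyLineAlt line]) []))

-- ===== PRECONDITION & SPEC =====
def Spec_tabbify (code : String) (out : String) : Prop := out = tabbify_alt code
instance (code : String) (out : String) : Decidable (Spec_tabbify code out) := by unfold Spec_tabbify; infer_instance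

-- ===== CLAIM (what is proved, stated in full; the proofs are below) =====
def Claim_equal_tabbify : Prop := ∀ (code : String), Dom_tabbify code → Spec_tabbify code (tabbify code)

-- ===== LEMMAS AND PROOFS =====

theorem replace_go_eq (old new : List Char) (hold : 0 < old.length) :
    ∀ fuel, ∀ l acc : List Char, l.length ≤ fuel →
      PySem.Chars.replace.go old new fuel l acc
        = acc.reverse ++ PySem.Chars.replace.go old new l.length l [] := by
  intro fuel
  induction fuel using Nat.strong_induction_on with
  | _ fuel ih =>
    intro l acc hl
    cases fuel with
    | zero =>
      have hl0 : l = [] := by cases l <;> simp_all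
      subst hl0
      simp [PySem.Chars.replace.go]
    | succ f =>
      cases l with
      | nil => simp [PySem.Chars.replace.go]
      | cons c t =>
        rw [PySem.Chars.replace.go]
        simp only [List.length_cons]
        rw [PySem.Chars.replace.go]
        split
        · rename_i hpre
          have hdrop : (List.drop old.length (c :: t)).length ≤ f := by
            simp [List.length_drop]
            simp at hl
            omega
          have hdrop2 : (List.drop old.length (c :: t)).length ≤ t.length := by
            simp [List.length_drop]; omega
          rw [ih f (by omega) _ _ hdrop, ih t.length (by simp at hl; omega) _ _ hdrop2]
          simp
        · rename_i hpre
          have ht : t.length ≤ f := by simp at hl; omega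
          rw [ih f (by omega) t (c :: acc) ht, ih t.length (by omega) t [c] (le_refl _)]
          simp
theorem replace_nil (old new : List Char) (hold : old ≠ []) :
    PySem.Chars.replace [] old new = [] := by
  simp [PySem.Chars.replace, hold, PySem.Chars.replace.go]

theorem replace_cons_prefix (old new l : List Char) (hold : old ≠ [])
    (h : old.isPrefixOf l) :
    PySem.Chars.replace l old new = new ++ PySem.Chars.replace (l.drop old.length) old new := by
  have hop : 0 < old.length := List.length_pos_of_ne_nil hold
  have hlp : 0 < l.length := by
    have := List.IsPrefix.length_le (List.isPrefixOf_iff_prefix.mp h)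
    omega
  simp only [PySem.Chars.replace, List.isEmpty_iff]
  rw [if_neg hold]
  obtain ⟨c, t, rfl⟩ : ∃ c t, l = c :: t := by
    cases l with
    | nil => simp at hlp
    | cons c t => exact ⟨_, _, rfl⟩
  simp only [List.length_cons]
  rw [PySem.Chars.replace.go]
  simp only [h, if_true]
  rw [replace_go_eq old new hop t.length _ _ (by simp [List.length_drop]; omega)]
  simp [hold]
theorem replace_cons_not_prefix (old new : List Char) (c : Char) (t : List Char) (hold : old ≠ [])
    (h : ¬ old.isPrefixOf (c :: t)) :
    PySem.Chars.replace (c :: t) old new = c :: PySem.Chars.replace t old new := by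
  have hop : 0 < old.length := List.length_pos_of_ne_nil hold
  simp only [PySem.Chars.replace, List.isEmpty_iff, List.length_cons]
  rw [if_neg hold]
  rw [PySem.Chars.replace.go]
  rw [if_neg h]
  rw [replace_go_eq old new hop t.length t [c] (le_refl _)]
  simp [hold]

def chainA (l : List Char) : List Char :=
  PySem.Chars.replace (PySem.Chars.replace (PySem.Chars.replace l [' ',' ',' ',' '] ['\t']) [' ',' '] ['\t']) [' '] []

theorem r3_filter (l : List Char) :
    PySem.Chars.replace l [' '] [] = l.filter (fun c => !(c == ' ')) := by
  induction l with
  | nil => exact replace_nil _ _ (by simp)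
  | cons c t ih =>
    by_cases hc : c = ' '
    · subst hc
      rw [replace_cons_prefix _ _ _ (by simp) (by simp [List.isPrefixOf])]
      simpa using ih
    · rw [replace_cons_not_prefix _ _ _ _ (by simp) (by simp [List.isPrefixOf]; exact fun h => hc h.symm)]
      simp [hc, ih]

theorem r1_tab (t : List Char) :
    PySem.Chars.replace ('\t' :: t) [' ',' ',' ',' '] ['\t'] = '\t' :: PySem.Chars.replace t [' ',' ',' ',' '] ['\t'] :=
  replace_cons_not_prefix _ _ _ _ (by simp) (by simp [List.isPrefixOf])

theorem r2_tab (t : List Char) :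
    PySem.Chars.replace ('\t' :: t) [' ',' '] ['\t'] = '\t' :: PySem.Chars.replace t [' ',' '] ['\t'] :=
  replace_cons_not_prefix _ _ _ _ (by simp) (by simp [List.isPrefixOf])

theorem r2_tabs (k : Nat) (y : List Char) :
    PySem.Chars.replace (List.replicate k '\t' ++ y) [' ',' '] ['\t']
      = List.replicate k '\t' ++ PySem.Chars.replace y [' ',' '] ['\t'] := by
  induction k with
  | zero => simp
  | succ k ih => simp [List.replicate_succ, r2_tab, ih]

theorem r1_nil : PySem.Chars.replace [] [' ',' ',' ',' '] ['\t'] = [] := replace_nil _ _ (by simp)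
theorem r2_nil : PySem.Chars.replace [] [' ',' '] ['\t'] = [] := replace_nil _ _ (by simp)

theorem r1_run : ∀ (n : Nat) (x : List Char), (x = [] ∨ ∃ t, x = '\t' :: t) →
    PySem.Chars.replace (List.replicate n ' ' ++ x) [' ',' ',' ',' '] ['\t']
      = List.replicate (n / 4) '\t' ++ List.replicate (n % 4) ' '
          ++ PySem.Chars.replace x [' ',' ',' ',' '] ['\t'] := by
  intro n
  induction n using Nat.strong_induction_on with
  | _ n ih =>
    intro x hx
    by_cases h4 : 4 ≤ n
    · obtain ⟨m, rfl⟩ : ∃ m, n = m + 4 := ⟨n - 4, by omega⟩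
      have : List.replicate (m + 4) ' ' ++ x
          = ' ' :: ' ' :: ' ' :: ' ' :: (List.replicate m ' ' ++ x) := by
        rw [show m + 4 = 4 + m by omega, List.replicate_add]; rfl
      rw [this, replace_cons_prefix _ _ _ (by simp) (by simp [List.isPrefixOf])]
      simp only [List.length_cons, List.length_nil]
      rw [List.drop_succ_cons, List.drop_succ_cons, List.drop_succ_cons, List.drop_succ_cons,
        List.drop_zero]
      rw [ih m (by omega) x hx]
      have h1 : (m + 4) / 4 = m / 4 + 1 := by omega
      have h2 : (m + 4) % 4 = m % 4 := by omega
      rw [h1, h2, List.replicate_add]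
      simp only [List.cons_append, List.nil_append, List.append_assoc]
      rw [show ('\t' :: (List.replicate (m / 4) '\t' ++ (List.replicate (m % 4) ' ' ++ PySem.Chars.replace x [' ', ' ', ' ', ' '] ['\t']))) = List.replicate (m / 4 + 1) '\t' ++ (List.replicate (m % 4) ' ' ++ PySem.Chars.replace x [' ', ' ', ' ', ' '] ['\t']) from by rw [List.replicate_succ]; rfl]
      rw [List.replicate_succ']
      simp
    · -- n < 4: no four consecutive spaces before x's head (empty or a tab)
      have hstep : ∀ (y : List Char), (y = [] ∨ ∃ t, y = '\t' :: t) → ∀ k, k < 4 →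
          PySem.Chars.replace (List.replicate k ' ' ++ y) [' ',' ',' ',' '] ['\t']
            = List.replicate k ' ' ++ PySem.Chars.replace y [' ',' ',' ',' '] ['\t'] := by
        intro y hy
        intro k hk
        interval_cases k
        · simp
        all_goals {
          rcases hy with rfl | ⟨t, rfl⟩ <;>
            · simp only [List.replicate_succ, List.replicate_zero, List.cons_append, List.nil_append, List.append_nil]
              repeat rw [replace_cons_not_prefix _ _ _ _ (by simp) (by simp [List.isPrefixOf])]
        }
      rw [hstep x hx n (by omega)]
      have : n / 4 = 0 := by omega
      simp [this, Nat.mod_eq_of_lt (by omega : n < 4)]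

theorem r2_small : ∀ (r : Nat), r < 4 → ∀ (z : List Char), (z = [] ∨ ∃ u, z = '\t' :: u) →
    PySem.Chars.replace (List.replicate r ' ' ++ z) [' ',' '] ['\t']
      = List.replicate (r / 2) '\t' ++ List.replicate (r % 2) ' '
          ++ PySem.Chars.replace z [' ',' '] ['\t'] := by
  have one : ∀ (z : List Char), (z = [] ∨ ∃ u, z = '\t' :: u) →
      PySem.Chars.replace (' ' :: z) [' ',' '] ['\t'] = ' ' :: PySem.Chars.replace z [' ',' '] ['\t'] := by
    intro z hz
    rcases hz with rfl | ⟨u, rfl⟩ <;>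
      rw [replace_cons_not_prefix _ _ _ _ (by simp) (by simp [List.isPrefixOf])]
  intro r hr z hz
  interval_cases r
  · simp
  · simpa using one z hz
  · rw [show List.replicate 2 ' ' ++ z = ' ' :: ' ' :: z from rfl,
      replace_cons_prefix _ _ _ (by simp) (by simp [List.isPrefixOf])]
    rfl
  · rw [show List.replicate 3 ' ' ++ z = ' ' :: ' ' :: (' ' :: z) from rfl,
      replace_cons_prefix _ _ _ (by simp) (by simp [List.isPrefixOf])]
    simp only [List.length_cons, List.length_nil, List.drop_succ_cons, List.drop_zero]
    rw [one z hz]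
    rfl

theorem chain_tab (t : List Char) : chainA ('\t' :: t) = '\t' :: chainA t := by
  unfold chainA
  rw [r1_tab, r2_tab, r3_filter, r3_filter]
  simp

theorem chain_run (m : Nat) (x : List Char) (hx : x = [] ∨ ∃ t, x = '\t' :: t) :
    chainA (List.replicate m ' ' ++ x) = List.replicate (m / 4 + m % 4 / 2) '\t' ++ chainA x := by
  unfold chainA
  rw [r1_run m x hx]
  have hz : (PySem.Chars.replace x [' ',' ',' ',' '] ['\t'] = [])
      ∨ ∃ u, PySem.Chars.replace x [' ',' ',' ',' '] ['\t'] = '\t' :: u := by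
    rcases hx with rfl | ⟨t, rfl⟩
    · exact Or.inl r1_nil
    · exact Or.inr ⟨_, r1_tab t⟩
  rw [List.append_assoc, r2_tabs, r2_small (m % 4) (by omega) _ hz]
  rw [r3_filter, r3_filter]
  simp only [List.filter_append, List.filter_replicate, List.append_assoc]
  rw [List.replicate_add, List.append_assoc]
  simp

theorem convGo_nil (parts : List Char) (run : Nat) :
    convGo [] parts run = parts ++ List.replicate (run / 4 + run % 4 / 2) '\t' := rfl

theorem convGo_tab (t parts : List Char) (run : Nat) :
    convGo ('\t' :: t) parts run
      = convGo t (parts ++ List.replicate (run / 4 + run % 4 / 2) '\t' ++ ['\t']) 0 := by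
  simp [convGo]

theorem convGo_spaces (m : Nat) (x parts : List Char) (run : Nat) :
    convGo (List.replicate m ' ' ++ x) parts run = convGo x parts (run + m) := by
  induction m generalizing run with
  | zero => simp
  | succ k ih =>
    rw [List.replicate_succ, List.cons_append]
    rw [show convGo (' ' :: (List.replicate k ' ' ++ x)) parts run
        = convGo (List.replicate k ' ' ++ x) parts (run + 1) from by simp [convGo]]
    rw [ih]
    congr 1
    omega

theorem main_conv_aux : ∀ (N : Nat) (ind : List Char), ind.length ≤ N → (∀ c ∈ ind, c = ' ' ∨ c = '\t') →
    ∀ parts : List Char, convGo ind parts 0 = parts ++ chainA ind := by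
  intro N
  induction N with
  | zero =>
    intro ind hlen _ parts
    have : ind = [] := by cases ind <;> simp_all
    subst this
    rw [convGo_nil]
    unfold chainA
    rw [r1_nil, r2_nil, r3_filter]
    simp
  | succ N ih =>
    intro ind hlen hok parts
    have hdec := List.takeWhile_append_dropWhile (p := fun c => c == ' ') (l := ind)
    set tw := ind.takeWhile (fun c => c == ' ') with htw
    set dw := ind.dropWhile (fun c => c == ' ') with hdw
    have hrep : tw = List.replicate tw.length ' ' := by
      apply List.eq_replicate_of_mem
      intro b hb
      have := List.mem_takeWhile_imp hb
      simpa using this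
    have hx : dw = [] ∨ ∃ t, dw = '\t' :: t := by
      cases hd : dw with
      | nil => exact Or.inl rfl
      | cons c t =>
        right
        refine ⟨t, ?_⟩
        have hne : ¬ (c == ' ') = true := by
          have := List.head?_dropWhile_not (p := fun c => c == ' ') (l := ind)
          rw [← hdw, hd] at this
          simpa using this
        have hmem : c ∈ ind := by
          rw [← hdec, hd]; simp
        rcases hok c hmem with h | h
        · simp [h] at hne
        · rw [h]
    rcases hx with hnil | ⟨t, ht⟩
    · rw [← hdec, hnil, List.append_nil, hrep]
      rw [show List.replicate tw.length ' ' = List.replicate tw.length ' ' ++ ([] : List Char) by simp]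
      rw [convGo_spaces, chain_run tw.length [] (Or.inl rfl), convGo_nil]
      unfold chainA
      rw [r1_nil, r2_nil, r3_filter]
      simp
    · have hshort : t.length ≤ N := by
        have : ind.length = tw.length + (t.length + 1) := by
          conv_lhs => rw [← hdec, ht]
          simp
        omega
      have hokt : ∀ c ∈ t, c = ' ' ∨ c = '\t' := by
        intro c hc
        exact hok c (by rw [← hdec, ht]; simp [hc])
      rw [← hdec, ht, hrep, convGo_spaces]
      simp only [Nat.zero_add]
      rw [convGo_tab, ih t hshort hokt]
      rw [chain_run tw.length ('\t' :: t) (Or.inr ⟨t, rfl⟩), chain_tab]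
      simp

theorem main_conv (ind : List Char) (hok : ∀ c ∈ ind, c = ' ' ∨ c = '\t') (parts : List Char) :
    convGo ind parts 0 = parts ++ chainA ind :=
  main_conv_aux ind.length ind (le_refl _) hok parts

theorem indent_eq_takeWhile (line : List Char) :
    PySem.Chars.slice line none
        (some ((line.length - (line.dropWhile (fun c => c == ' ' || c == '\t')).length : Nat) : Int))
      = line.takeWhile (fun c => c == ' ' || c == '\t') := by
  unfold PySem.Chars.slice
  rw [PySem.List.slice_to_natCast]
  have hdec := List.takeWhile_append_dropWhile (p := fun c : Char => c == ' ' || c == '\t') (l := line)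
  have hlen : line.length
      = (line.takeWhile (fun c => c == ' ' || c == '\t')).length
        + (line.dropWhile (fun c => c == ' ' || c == '\t')).length := by
    have := congrArg List.length hdec
    simp only [List.length_append] at this
    omega
  rw [show line.length - (line.dropWhile (fun c => c == ' ' || c == '\t')).length
      = (line.takeWhile (fun c => c == ' ' || c == '\t')).length by omega]
  exact (List.prefix_iff_eq_take.mp (List.takeWhile_prefix _)).symm

theorem line_eq (line : List Char) : tabbifyLine line = tabbifyLineAlt line := by
  unfold tabbifyLine tabbifyLineAlt
  simp only [indent_eq_takeWhile]
  have hok : ∀ c ∈ line.takeWhile (fun c : Char => c == ' ' || c == '\t'), c = ' ' ∨ c = '\t' := by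
    intro c hc
    have := List.mem_takeWhile_imp hc
    simpa using this
  rw [main_conv _ hok []]
  simp [chainA]

theorem tabbify_eq_alt (code : String) : tabbify code = tabbify_alt code := by
  unfold tabbify tabbify_alt
  have hf : (fun (acc : List (List Char)) line => acc ++ [tabbifyLine line])
      = (fun acc line => acc ++ [tabbifyLineAlt line]) := by
    funext acc line
    rw [line_eq]
  rw [hf]

-- ===== VERDICT (by name: the statement is the Claim_ definition above) =====
theorem tabbify_spec : Claim_equal_tabbify := by
  intro code _
  unfold Spec_tabbify
  exact tabbify_eq_alt code
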